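-- pv_equiv track=rewrite | github.com/SHI-ZP/Coursera_Machine_Learning_Engineer | AlgorithmicToolbox/w4/majority_element/majority_element.py | find_median_pivot
-- ===== SOURCE A (Python) =====
-- def bubble_sort(a):
--     for i in range(len(a)):
--         for j in range(len(a)-1, 0, -1):
--             if a[j] < a[j-1]:
--                 a[j], a[j-1] = a[j-1], a[j]
--
-- def find_median_pivot(a, left, right):
--     pivot_index_list = [left, int((left + right) / 2), right]
--     pivot_value_list = [a[i] for i in pivot_index_list]
--     bubble_sort(pivot_value_list)
--     _median_index = 0
--     for i in range(3):
--         if a[pivot_index_list[i]] == pivot_value_list[1]: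
--             _median_index = i
--             break
--
--     return pivot_index_list[_median_index]
-- ===== SOURCE B (Python) =====
-- def find_median_pivot(a, left, right):
--     mid = int((left + right) / 2)
--     v0, v1, v2 = a[left], a[mid], a[right]
--     if v1 <= v0 <= v2 or v2 <= v0 <= v1:
--         return left
--     if v0 <= v1 <= v2 or v2 <= v1 <= v0:
--         return mid
--     return right
-- ===== Notes on version B (the rewrite author's own statement) =====
-- stated objective: simpler
-- what changed: Replaces the index/value lists, the bubble sort of the three values and the median-search loop by a direct closed-form median-of-three comparison chain (checked in left, mid, right order to keep the first-index tie-break).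
import Mathlib
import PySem

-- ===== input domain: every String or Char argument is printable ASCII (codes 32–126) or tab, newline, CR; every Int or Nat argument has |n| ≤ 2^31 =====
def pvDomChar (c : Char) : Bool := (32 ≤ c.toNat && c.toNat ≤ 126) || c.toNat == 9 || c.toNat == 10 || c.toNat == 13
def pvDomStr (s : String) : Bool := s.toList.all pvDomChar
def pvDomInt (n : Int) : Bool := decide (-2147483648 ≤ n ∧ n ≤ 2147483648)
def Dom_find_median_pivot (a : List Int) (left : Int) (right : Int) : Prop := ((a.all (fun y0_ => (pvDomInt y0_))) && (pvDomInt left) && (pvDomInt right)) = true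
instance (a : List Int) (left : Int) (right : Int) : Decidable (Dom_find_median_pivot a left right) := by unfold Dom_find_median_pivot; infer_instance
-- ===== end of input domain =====

-- B replaces A's value lists + 3-element bubble sort + median-search loop by a direct
-- closed-form median-of-three comparison chain (objective: simpler).
-- Note: int((left+right)/2) is exact as Int.tdiv for |left|,|right| ≤ 2^31 (the float is exact there).

-- ===== PORT A =====
-- inner loop 'for j in range(len(a)-1, 0, -1)' of bubble_sort (j ≥ 1, so indices are in range;
-- pyGetD/pySetD are exact here)
def pvBubblePass (l : List Int) : List Int :=
  (PySem.List.pyRange ((l.length : Int) - 1) 0 (-1)).foldl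
    (fun acc j =>
      let vj := PySem.List.pyGetD acc j 0
      let vj1 := PySem.List.pyGetD acc (j - 1) 0
      if vj < vj1 then PySem.List.pySetD (PySem.List.pySetD acc j vj1) (j - 1) vj else acc) l

-- bubble_sort(a): Python mutates its argument; ported as a function returning the sorted list
def pvBubbleSort (a : List Int) : List Int :=
  (PySem.List.pyRange 0 (a.length : Int) 1).foldl (fun acc _ => pvBubblePass acc) a

-- 'for i in range(3): if a[pivot_index_list[i]] == pivot_value_list[1]: _median_index = i; break'
def pvMedianIndexLoop (a idxs vals : List Int) : List Int → Int → Int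
  | [], acc => acc
  | i :: rest, acc =>
    if PySem.List.pyGetD a (PySem.List.pyGetD idxs i 0) 0 = PySem.List.pyGetD vals 1 0
    then i else pvMedianIndexLoop a idxs vals rest acc

def find_median_pivot (a : List Int) (left : Int) (right : Int) : Int :=
  let mid := Int.tdiv (left + right) 2
  let idxs := [left, mid, right]
  let vals := idxs.map (fun i => PySem.List.pyGetD a i 0)  -- Pre_ excludes IndexError
  let sortedVals := pvBubbleSort vals
  let m := pvMedianIndexLoop a idxs sortedVals (PySem.List.pyRange 0 3 1) 0
  PySem.List.pyGetD idxs m 0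

-- ===== PORT B =====
def find_median_pivot_alt (a : List Int) (left : Int) (right : Int) : Int :=
  let mid := Int.tdiv (left + right) 2
  let v0 := PySem.List.pyGetD a left 0
  let v1 := PySem.List.pyGetD a mid 0
  let v2 := PySem.List.pyGetD a right 0
  if (v1 ≤ v0 ∧ v0 ≤ v2) ∨ (v2 ≤ v0 ∧ v0 ≤ v1) then left
  else if (v0 ≤ v1 ∧ v1 ≤ v2) ∨ (v2 ≤ v1 ∧ v1 ≤ v0) then mid
  else right

-- ===== PRECONDITION & SPEC =====
-- Pre_: exactly the inputs where Python A's three indexings a[left], a[mid], a[right]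
-- do not raise IndexError (negative indices wrap, as in Python).
def Pre_find_median_pivot (a : List Int) (left : Int) (right : Int) : Prop :=
  PySem.Raise.InRange a.length left ∧
  PySem.Raise.InRange a.length (Int.tdiv (left + right) 2) ∧
  PySem.Raise.InRange a.length right
instance (a : List Int) (left : Int) (right : Int) : Decidable (Pre_find_median_pivot a left right) := by
  unfold Pre_find_median_pivot; infer_instance

def pvWitness_find_median_pivot : List Int × Int × Int := ([3, 1, 2], 0, 2)

def Spec_find_median_pivot (a : List Int) (left : Int) (right : Int) (out : Int) : Prop := out = find_median_pivot_alt a left right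
instance (a : List Int) (left : Int) (right : Int) (out : Int) : Decidable (Spec_find_median_pivot a left right out) := by unfold Spec_find_median_pivot; infer_instance

-- ===== CLAIM (what is proved, stated in full; the proofs are below) =====
def Claim_equal_find_median_pivot : Prop := ∀ (a : List Int) (left : Int) (right : Int), Dom_find_median_pivot a left right → Pre_find_median_pivot a left right → Spec_find_median_pivot a left right (find_median_pivot a left right)

-- ===== LEMMAS AND PROOFS =====

-- one inner bubble pass over a 3-element list, written out as nested ifs
lemma pass3 (x y z : Int) : pvBubblePass [x, y, z] =
    if z < y then (if z < x then [z, x, y] else [x, z, y])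
    else (if y < x then [y, x, z] else [x, y, z]) := by
  unfold pvBubblePass
  have h : PySem.List.pyRange ((([x, y, z].length : Nat) : Int) - 1) 0 (-1) = [2, 1] := by
    show PySem.List.pyRange ((3 : Int) - 1) 0 (-1) = [2, 1]; decide
  rw [h]
  simp only [List.foldl]
  have g2 : PySem.List.pyGetD [x, y, z] 2 0 = z := rfl
  have g21 : PySem.List.pyGetD [x, y, z] (2 - 1) 0 = y := rfl
  have s2 : PySem.List.pySetD (PySem.List.pySetD [x, y, z] 2 y) (2 - 1) z = [x, z, y] := rfl
  rw [g2, g21, s2]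
  by_cases hzy : z < y
  · rw [if_pos hzy, if_pos hzy]
    have g1 : PySem.List.pyGetD [x, z, y] 1 0 = z := rfl
    have g10 : PySem.List.pyGetD [x, z, y] (1 - 1) 0 = x := rfl
    have s1 : PySem.List.pySetD (PySem.List.pySetD [x, z, y] 1 x) (1 - 1) z = [z, x, y] := rfl
    rw [g1, g10, s1]
  · rw [if_neg hzy, if_neg hzy]
    have g1 : PySem.List.pyGetD [x, y, z] 1 0 = y := rfl
    have g10 : PySem.List.pyGetD [x, y, z] (1 - 1) 0 = x := rfl
    have s1 : PySem.List.pySetD (PySem.List.pySetD [x, y, z] 1 x) (1 - 1) y = [y, x, z] := rfl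
    rw [g1, g10, s1]

-- the outer 'for i in range(len(a))' makes exactly three passes on a 3-element list
lemma bs_eq (x y z : Int) :
    pvBubbleSort [x, y, z] = pvBubblePass (pvBubblePass (pvBubblePass [x, y, z])) := by
  unfold pvBubbleSort
  have h : PySem.List.pyRange 0 (([x, y, z].length : Nat) : Int) 1 = [0, 1, 2] := by
    show PySem.List.pyRange 0 (3 : Int) 1 = [0, 1, 2]; decide
  rw [h]
  simp only [List.foldl]

set_option maxHeartbeats 1600000 in
lemma key (a : List Int) (l r v0 v1 v2 : Int)
    (h0 : PySem.List.pyGetD a l 0 = v0)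
    (h1 : PySem.List.pyGetD a (Int.tdiv (l + r) 2) 0 = v1)
    (h2 : PySem.List.pyGetD a r 0 = v2) :
    find_median_pivot a l r = find_median_pivot_alt a l r := by
  have e1 : PySem.List.pyRange 0 3 1 = [0, 1, 2] := by decide
  have gmid : ∀ p q s : Int, PySem.List.pyGetD [p, q, s] 1 0 = q := fun _ _ _ => rfl
  have gi0 : ∀ p q s : Int, PySem.List.pyGetD [p, q, s] 0 0 = p := fun _ _ _ => rfl
  have gi2 : ∀ p q s : Int, PySem.List.pyGetD [p, q, s] 2 0 = s := fun _ _ _ => rfl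
  simp only [find_median_pivot, find_median_pivot_alt, pvMedianIndexLoop, List.map,
    e1, bs_eq, pass3, apply_ite pvBubblePass, h0, h1, h2, gmid, gi0, gi2]
  split_ifs <;> simp only [gmid, gi0, gi2, not_true_eq_false] at * <;> omega

-- ===== VERDICT (by name: the statement is the Claim_ definition above) =====
theorem find_median_pivot_spec : Claim_equal_find_median_pivot := by
  intro a left right _ hpre
  unfold Spec_find_median_pivot
  exact key a left right _ _ _ rfl rfl rfl
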